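-- pv_equiv track=rewrite | github.com/sms03/Typing-Speed-Test | Type_Test_v2.py | calculate_mistakes_and_correct_count
-- ===== SOURCE A (Python) =====
-- def calculate_mistakes_and_correct_count(actual_text, user_text):
--     error_count = 0
--     correct_count = 0
--     for i in range(len(actual_text)):
--         try:
--             if actual_text[i] != user_text[i]:
--                 error_count += 1
--             else:
--                 correct_count += 1
--         except IndexError:
--             error_count += 1
--     return error_count, correct_count
-- ===== SOURCE B (Python) =====
-- def calculate_mistakes_and_correct_count(actual_text, user_text):
--     correct = sum(a == b for a, b in zip(actual_text, user_text))
--     paired = min(len(actual_text), len(user_text))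
--     tail = max(0, len(actual_text) - len(user_text))
--     return paired - correct + tail, correct
-- ===== Notes on version B (the rewrite author's own statement) =====
-- stated objective: simpler
-- what changed: Replaces the index loop with try/except IndexError by a single zip pass counting matching characters plus length arithmetic for the unmatched tail of actual_text.
import Mathlib
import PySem

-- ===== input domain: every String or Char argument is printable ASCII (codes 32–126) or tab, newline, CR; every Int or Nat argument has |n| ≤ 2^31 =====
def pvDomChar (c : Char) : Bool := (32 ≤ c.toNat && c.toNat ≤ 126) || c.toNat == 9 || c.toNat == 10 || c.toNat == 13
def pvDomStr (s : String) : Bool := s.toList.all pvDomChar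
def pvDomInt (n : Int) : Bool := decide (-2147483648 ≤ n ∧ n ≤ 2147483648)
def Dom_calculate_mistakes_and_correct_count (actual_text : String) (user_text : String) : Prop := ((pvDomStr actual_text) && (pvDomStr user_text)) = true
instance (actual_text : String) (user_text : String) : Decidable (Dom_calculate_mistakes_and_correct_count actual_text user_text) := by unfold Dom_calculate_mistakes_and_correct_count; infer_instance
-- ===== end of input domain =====

-- ===== PORT A =====
-- B replaces A's index loop + try/except IndexError by one zip pass and length arithmetic (same result, simpler).
def calculate_mistakes_and_correct_count (actual_text : String) (user_text : String) : Int × Int :=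
  (PySem.List.pyRange 0 (PySem.Str.len actual_text) 1).foldl
    (fun (st : Int × Int) i =>
      match PySem.Str.pyGet? actual_text i with
      | none => (st.1 + 1, st.2)          -- IndexError on actual_text[i] (never happens for i in range)
      | some ca =>
        match PySem.Str.pyGet? user_text i with
        | none => (st.1 + 1, st.2)        -- IndexError on user_text[i]
        | some cu => if ca ≠ cu then (st.1 + 1, st.2) else (st.1, st.2 + 1))
    (0, 0)

-- ===== PORT B =====
def calculate_mistakes_and_correct_count_alt (actual_text : String) (user_text : String) : Int × Int :=
  let la := actual_text.toList
  let lu := user_text.toList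
  let correct : Int := ((la.zip lu).countP (fun p => p.1 == p.2) : Int)
  let paired : Int := min (la.length : Int) (lu.length : Int)
  let tail : Int := max 0 ((la.length : Int) - (lu.length : Int))
  (paired - correct + tail, correct)

-- ===== PRECONDITION & SPEC =====
def Spec_calculate_mistakes_and_correct_count (actual_text : String) (user_text : String) (out : Int × Int) : Prop := out = calculate_mistakes_and_correct_count_alt actual_text user_text
instance (actual_text : String) (user_text : String) (out : Int × Int) : Decidable (Spec_calculate_mistakes_and_correct_count actual_text user_text out) := by unfold Spec_calculate_mistakes_and_correct_count; infer_instance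

-- ===== CLAIM (what is proved, stated in full; the proofs are below) =====
def Claim_equal_calculate_mistakes_and_correct_count : Prop := ∀ (actual_text : String) (user_text : String), Dom_calculate_mistakes_and_correct_count actual_text user_text → Spec_calculate_mistakes_and_correct_count actual_text user_text (calculate_mistakes_and_correct_count actual_text user_text)

-- ===== LEMMAS AND PROOFS =====

-- Invariant of A's loop over the first n indices: errors + corrects seen so far,
-- where the corrects are the matching positions of the zipped prefixes.
theorem foldA_eq (la lu : List Char) (n : Nat) (hn : n ≤ la.length) :
    (List.range n).foldl
      (fun (st : Int × Int) (k : Nat) =>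
        match la[k]? with
        | none => (st.1 + 1, st.2)
        | some ca =>
          match lu[k]? with
          | none => (st.1 + 1, st.2)
          | some cu => if ca ≠ cu then (st.1 + 1, st.2) else (st.1, st.2 + 1)) (0, 0)
    = ((n : Int) - (((la.zip lu).take n).countP (fun p => p.1 == p.2) : Int),
       (((la.zip lu).take n).countP (fun p => p.1 == p.2) : Int)) := by
  induction n with
  | zero => simp
  | succ m ih =>
    have hm : m ≤ la.length := Nat.le_of_succ_le hn
    have hma : m < la.length := hn
    rw [List.range_succ, List.foldl_append, ih hm]
    simp only [List.foldl_cons, List.foldl_nil]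
    rw [List.getElem?_eq_getElem hma]
    by_cases hmu : m < lu.length
    · have hmz : m < (la.zip lu).length := by rw [List.length_zip]; omega
      rw [List.getElem?_eq_getElem hmu]
      have htake : (la.zip lu).take (m + 1)
          = (la.zip lu).take m ++ [(la.zip lu)[m]] := by
        rw [List.take_add_one, List.getElem?_eq_getElem hmz]; rfl
      rw [htake, List.countP_append]
      have hz : (la.zip lu)[m] = (la[m], lu[m]) := by simp
      by_cases heq : la[m] = lu[m]
      · simp [hz, heq]
      · simp [hz, heq]
        omega
    · have hge : (la.zip lu).length ≤ m := by rw [List.length_zip]; omega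
      rw [List.getElem?_eq_none (by omega), List.take_of_length_le hge,
          List.take_of_length_le (Nat.le_succ_of_le hge)]
      simp only [Prod.ext_iff]
      constructor
      · push_cast; omega
      · trivial

-- ===== VERDICT (by name: the statement is the Claim_ definition above) =====
theorem calculate_mistakes_and_correct_count_spec : Claim_equal_calculate_mistakes_and_correct_count := by
  intro a u _
  unfold Spec_calculate_mistakes_and_correct_count
  unfold calculate_mistakes_and_correct_count calculate_mistakes_and_correct_count_alt
  have hlen : PySem.Str.len a = (a.toList.length : Int) := by simp [PySem.Str.len_eq]
  rw [hlen, PySem.List.pyRange_zero_natCast, List.foldl_map]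
  simp only [PySem.Str.pyGet?_natCast]
  rw [foldA_eq a.toList u.toList a.toList.length le_rfl,
      List.take_of_length_le (by rw [List.length_zip]; exact Nat.min_le_left _ _)]
  have h1 := List.countP_le_length (p := fun p => p.1 == p.2) (l := a.toList.zip u.toList)
  rw [List.length_zip] at h1
  simp only [Prod.ext_iff]
  refine ⟨?_, trivial⟩
  omega
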